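-- pv_equiv track=rewrite | github.com/MatthewPritchard/AdventOfCode2022 | google/gears.py | narrow
-- ===== SOURCE A (Python) =====
-- def narrow(pegs, distances, a):
--     current = a
--     for i in range(len(pegs) - 1):
--         if current > distances[i]:
--             current = distances[i] - 1
--             for j in range(i, 0, -1):
--                 current = distances[j - 1] - current
--             return current, -1
--         current = distances[i] - current
--     return a, current
-- ===== SOURCE B (Python) =====
-- def narrow(pegs, distances, a):
--     # Two staged passes: tabulate (distance, sign, alternating prefix sum) per
--     # step, then look up the first triggering state and answer in closed form.
--     n = max(len(pegs) - 1, 0)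
--     states = []
--     s, t = 1, 0
--     for d in distances[:n]:
--         states.append((d, s, t))
--         t += s * d
--         s = -s
--     for d, si, ti in states:
--         if si * (a - ti) > d:
--             return si * (d - 1) + ti, -1
--     return a, s * (a - t)
-- ===== Notes on version B (the rewrite author's own statement) =====
-- stated objective: alternative
-- what changed: Instead of A's mutating reflection state with an inner backward loop, B first tabulates (distance, sign, alternating prefix sum) states in one pass, then searches that table for the first trigger and returns its closed-form value s*(d-1)+t.
-- outside the precondition, e.g. on narrow([1, 2, 3], [0], 5): A returns (-1, -1), B returns (-1, -1)
import Mathlib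
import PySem

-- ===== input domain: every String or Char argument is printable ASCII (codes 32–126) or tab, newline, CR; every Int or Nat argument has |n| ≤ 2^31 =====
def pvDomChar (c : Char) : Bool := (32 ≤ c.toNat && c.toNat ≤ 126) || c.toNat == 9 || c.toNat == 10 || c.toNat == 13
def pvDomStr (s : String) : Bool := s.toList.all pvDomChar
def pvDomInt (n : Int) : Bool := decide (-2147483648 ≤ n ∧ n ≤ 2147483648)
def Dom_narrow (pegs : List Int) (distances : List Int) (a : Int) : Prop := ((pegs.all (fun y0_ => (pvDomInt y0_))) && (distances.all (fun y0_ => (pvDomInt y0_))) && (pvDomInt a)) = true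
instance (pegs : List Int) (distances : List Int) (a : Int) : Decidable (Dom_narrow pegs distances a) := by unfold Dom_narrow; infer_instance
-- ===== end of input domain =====

-- B replaces A's mutating current + inner backward reflection loop by two staged
-- passes: tabulate (distance, sign, alternating prefix sum) states, then find the
-- first trigger and answer in closed form (objective: alternative).

-- ===== PORT A =====
-- inner loop: for j in range(i, 0, -1): current = distances[j-1] - current
def narrowInner (distances : List Int) : Nat → Int → Int
  | 0, current => current
  | j + 1, current => narrowInner distances j (distances.getD j 0 - current)

-- outer loop: rem iterations left, i is the current index
def narrowLoop (distances : List Int) (a : Int) : Nat → Nat → Int → Int × Int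
  | 0, _, current => (a, current)
  | rem + 1, i, current =>
    let d := distances.getD i 0
    if current > d then (narrowInner distances i (d - 1), -1)
    else narrowLoop distances a rem (i + 1) (d - current)

def narrow (pegs : List Int) (distances : List Int) (a : Int) : Int × Int :=
  narrowLoop distances a (pegs.length - 1) 0 a

-- ===== PORT B =====
-- stage 1: states.append((d, s, t)); t += s*d; s = -s  — returns (states, (s, t))
def buildStates : List Int → Int → Int → List (Int × Int × Int) × Int × Int
  | [], s, t => ([], s, t)
  | d :: ds, s, t =>
    let r := buildStates ds (-s) (t + s * d)
    ((d, s, t) :: r.1, r.2)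

def narrow_alt (pegs : List Int) (distances : List Int) (a : Int) : Int × Int :=
  let r := buildStates (distances.take (pegs.length - 1)) 1 0
  match r.1.find? (fun p => decide (p.2.1 * (a - p.2.2) > p.1)) with
  | some p => (p.2.1 * (p.1 - 1) + p.2.2, -1)
  | none => (a, r.2.1 * (a - r.2.2))

-- ===== PRECONDITION & SPEC =====
-- Pre_ excludes inputs with fewer than len(pegs)-1 distances, on which A raises
-- IndexError unless an early trigger returns first (cite in claim.json).
def Pre_narrow (pegs : List Int) (distances : List Int) (a : Int) : Prop :=
  pegs.length - 1 ≤ distances.length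
instance (pegs : List Int) (distances : List Int) (a : Int) : Decidable (Pre_narrow pegs distances a) := by unfold Pre_narrow; infer_instance
def pvWitness_narrow : List Int × List Int × Int := ([1, 2], [3], 0)

def Spec_narrow (pegs : List Int) (distances : List Int) (a : Int) (out : Int × Int) : Prop := out = narrow_alt pegs distances a
instance (pegs : List Int) (distances : List Int) (a : Int) (out : Int × Int) : Decidable (Spec_narrow pegs distances a out) := by unfold Spec_narrow; infer_instance

-- ===== CLAIM (what is proved, stated in full; the proofs are below) =====
def Claim_equal_narrow : Prop := ∀ (pegs : List Int) (distances : List Int) (a : Int), Dom_narrow pegs distances a → Pre_narrow pegs distances a → Spec_narrow pegs distances a (narrow pegs distances a)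

-- ===== LEMMAS AND PROOFS =====

-- Invariant: if the reflection chain at index i is the affine map x ↦ s*x + t
-- (s = ±1) and L is the segment of distances starting at i, then A's loop on that
-- segment equals B's table search seeded with (s, t).
theorem narrowLoop_eq (distances : List Int) (a : Int) :
    ∀ (L : List Int) (i : Nat) (s t : Int), (s = 1 ∨ s = -1) →
    (∀ x : Int, narrowInner distances i x = s * x + t) →
    (∀ k : Nat, k < L.length → distances.getD (i + k) 0 = L.getD k 0) →
    narrowLoop distances a L.length i (s * (a - t)) =
      (match (buildStates L s t).1.find? (fun p => decide (p.2.1 * (a - p.2.2) > p.1)) with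
       | some p => (p.2.1 * (p.1 - 1) + p.2.2, -1)
       | none => (a, (buildStates L s t).2.1 * (a - (buildStates L s t).2.2))) := by
  intro L
  induction L with
  | nil => intro i s t _ _ _; simp [narrowLoop, buildStates]
  | cons d ds ih =>
    intro i s t hs hinner hseg
    have hd : distances.getD i 0 = d := by
      have := hseg 0 (by simp)
      simpa using this
    simp only [List.length_cons, narrowLoop, buildStates, List.find?]
    rw [hd]
    by_cases h : s * (a - t) > d
    · rw [if_pos h, hinner]
      simp [h]
    · rw [if_neg h]
      have hst : d - s * (a - t) = -s * (a - (t + s * d)) := by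
        rcases hs with h1 | h1 <;> subst h1 <;> ring
      rw [hst]
      have := ih (i + 1) (-s) (t + s * d)
        (by rcases hs with h1 | h1 <;> subst h1 <;> simp)
        (by
          intro x
          show narrowInner distances i (distances.getD i 0 - x) = _
          rw [hinner, hd]; ring)
        (by
          intro k hk
          have := hseg (k + 1) (by simpa using Nat.succ_lt_succ hk)
          simpa [Nat.add_comm, Nat.add_assoc, Nat.add_left_comm] using this)
      rw [this]
      simp [h]

-- ===== VERDICT (by name: the statement is the Claim_ definition above) =====
theorem narrow_spec : Claim_equal_narrow := by
  intro pegs distances a _ hpre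
  show narrow pegs distances a = narrow_alt pegs distances a
  unfold narrow narrow_alt
  have hlen : (distances.take (pegs.length - 1)).length = pegs.length - 1 := by
    simpa using Nat.min_eq_left hpre
  have h := narrowLoop_eq distances a (distances.take (pegs.length - 1)) 0 1 0
    (Or.inl rfl)
    (fun x => by simp [narrowInner])
    (by
      intro k hk
      rw [hlen] at hk
      simp [List.getD, hk])
  rw [hlen] at h
  simpa using h
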